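-- pv_equiv track=rewrite | github.com/seanmichaelmcgee/metajudge | metajudge/validation/run_checks.py | _v4_check_unique_ids
-- ===== SOURCE A (Python) =====
-- from typing import Any, Dict, List
--
-- def _v4_check_unique_ids(items: List[Dict[str, Any]]) -> List[str]:
--     """FAIL: all item_ids must be unique."""
--     seen: Dict[str, int] = {}
--     for item in items:
--         iid = str(item.get("item_id", ""))
--         seen[iid] = seen.get(iid, 0) + 1
--     findings = []
--     for iid, count in sorted(seen.items()):
--         if count > 1:
--             findings.append(f"{iid}: appears {count} times")
--     return findings
-- ===== SOURCE B (Python) =====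
-- from typing import Any, Dict, List
--
-- def _v4_check_unique_ids(items: List[Dict[str, Any]]) -> List[str]:
--     """FAIL: all item_ids must be unique."""
--     ids = sorted(str(item.get("item_id", "")) for item in items)
--     findings = []
--     i, n = 0, len(ids)
--     while i < n:
--         j = i + 1
--         while j < n and ids[j] == ids[i]:
--             j += 1
--         if j - i > 1:
--             findings.append(f"{ids[i]}: appears {j - i} times")
--         i = j
--     return findings
-- ===== Notes on version B (the rewrite author's own statement) =====
-- stated objective: alternative
-- what changed: B replaces A's count-dictionary plus sorted(dict.items()) pass with sorting the normalised id list once and run-length counting consecutive equal ids.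
import Mathlib
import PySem

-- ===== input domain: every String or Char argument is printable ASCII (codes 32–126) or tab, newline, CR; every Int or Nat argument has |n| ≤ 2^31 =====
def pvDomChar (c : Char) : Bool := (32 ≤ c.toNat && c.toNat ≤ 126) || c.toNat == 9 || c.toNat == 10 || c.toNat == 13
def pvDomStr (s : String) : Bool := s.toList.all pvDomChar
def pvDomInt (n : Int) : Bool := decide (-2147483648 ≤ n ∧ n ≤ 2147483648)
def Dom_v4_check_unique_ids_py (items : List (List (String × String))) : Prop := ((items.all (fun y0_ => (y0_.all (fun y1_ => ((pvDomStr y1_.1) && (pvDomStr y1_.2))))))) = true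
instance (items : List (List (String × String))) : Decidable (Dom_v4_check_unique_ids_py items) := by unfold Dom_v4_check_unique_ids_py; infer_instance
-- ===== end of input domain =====

-- B replaces A's count-dictionary pass with sort-then-group-consecutive run counting (same cost class, different algorithm).

-- ===== PORT A =====
-- str(item.get("item_id", "")): values are strings here, so str() is the identity;
-- item.get is first-match lookup on the association list
def pvIid (item : List (String × String)) : String := (PySem.Dict.mk item).getD "item_id" ""

-- f"{iid}: appears {count} times"
def pvFmt (iid : String) (c : Int) : String := iid ++ ": appears " ++ PySem.Int.toStr c ++ " times"

def v4_check_unique_ids_py (items : List (List (String × String))) : List String :=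
  let seen : PySem.Dict String Int := items.foldl (fun d item =>
      let iid := pvIid item
      d.insert iid (d.getD iid 0 + 1)) PySem.Dict.empty
  -- sorted(seen.items()): dict keys are unique, so Python's tuple comparison is always
  -- decided by the first component; sorting by the key is exact here
  (PySem.List.sorted seen.items (fun p => p.1) false).foldl (fun findings p =>
      if p.2 > 1 then findings ++ [pvFmt p.1 p.2] else findings) []

-- ===== PORT B =====
-- the inner while loop of Source B: one run of equal ids starting at position i
def pvRuns : List String → List String
  | [] => []
  | x :: xs =>
      let run := xs.takeWhile (fun y => y == x)
      let rest := xs.dropWhile (fun y => y == x)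
      (if run.length + 1 > 1 then [pvFmt x ((run.length : Int) + 1)] else []) ++ pvRuns rest
termination_by l => l.length
decreasing_by
  have := List.length_dropWhile_le (fun y => y == x) xs
  simp only [List.length_cons]
  omega

def v4_check_unique_ids_py_alt (items : List (List (String × String))) : List String :=
  pvRuns (PySem.List.sorted (items.map (fun item => pvIid item)) (fun s => s) false)

-- ===== PRECONDITION & SPEC =====
def Spec_v4_check_unique_ids_py (items : List (List (String × String))) (out : List String) : Prop := out = v4_check_unique_ids_py_alt items
instance (items : List (List (String × String))) (out : List String) : Decidable (Spec_v4_check_unique_ids_py items out) := by unfold Spec_v4_check_unique_ids_py; infer_instance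

-- ===== CLAIM (what is proved, stated in full; the proofs are below) =====
def Claim_equal_v4_check_unique_ids_py : Prop := ∀ (items : List (List (String × String))), Dom_v4_check_unique_ids_py items → Spec_v4_check_unique_ids_py items (v4_check_unique_ids_py items)

-- ===== LEMMAS AND PROOFS =====

-- set(l) commutes with filter
theorem pv_ofList_filter (q : String → Bool) (l : List String) :
    (PySem.Set.ofList l).filter q = PySem.Set.ofList (l.filter q) := by
  induction l with
  | nil => rfl
  | cons a t ih =>
    rw [PySem.Set.ofList_cons]
    by_cases hqa : q a = true
    · rw [List.filter_cons_of_pos hqa, List.filter_cons_of_pos hqa,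
        PySem.Set.ofList_cons, ← ih]
      show a :: ((PySem.Set.ofList t).filter _).filter q
          = a :: ((PySem.Set.ofList t).filter q).filter _
      rw [List.filter_filter, List.filter_filter]
      congr 1
      apply List.filter_congr
      intro y _
      exact Bool.and_comm _ _
    · have hqa' : q a = false := by simpa using hqa
      rw [List.filter_cons_of_neg (by simp [hqa']), List.filter_cons_of_neg (by simp [hqa']),
        ← ih]
      show ((PySem.Set.ofList t).filter _).filter q = (PySem.Set.ofList t).filter q
      rw [List.filter_filter]
      apply List.filter_congr
      intro y _
      by_cases hy : (y == a) = true
      · have hya : y = a := by simpa using hy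
        simp [hya, hqa']
      · simp [hy]

-- set(l) is a sublist of l (first occurrences, in order)
theorem pv_ofList_sublist (l : List String) : (PySem.Set.ofList l).Sublist l := by
  induction l with
  | nil => exact List.Sublist.refl _
  | cons a t ih =>
    rw [PySem.Set.ofList_cons]
    exact List.Sublist.cons₂ a (List.filter_sublist.trans ih)

-- in a sorted list, dropping the leading equal run removes every copy of x
theorem pv_not_mem_dropWhile (l : List String) (x : String)
    (hle : ∀ y ∈ l, x ≤ y) (hp : l.Pairwise (· ≤ ·)) :
    x ∉ l.dropWhile (fun y => y == x) := by
  induction l with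
  | nil => simp
  | cons a t ih =>
    rw [List.dropWhile_cons]
    by_cases h : (a == x) = true
    · rw [if_pos h]
      exact ih (fun y hy => hle y (List.mem_cons_of_mem a hy)) hp.tail
    · rw [if_neg h]
      have hax : a ≠ x := by simpa using h
      have hxa : x < a := lt_of_le_of_ne (hle a (List.mem_cons_self)) (Ne.symm hax)
      intro hmem
      rcases List.mem_cons.mp hmem with rfl | hmem
      · exact absurd rfl hax.symm
      · have : a ≤ x := (List.pairwise_cons.mp hp).1 x hmem
        exact absurd (lt_of_lt_of_le hxa this) (lt_irrefl x)

-- main lemma: run-length grouping of a sorted list equals the filtered count map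
theorem pv_runs_eq (L : List String) (hp : L.Pairwise (· ≤ ·)) :
    pvRuns L = ((PySem.Set.ofList L).filter
        (fun k => decide ((1 : Int) < (List.count k L : Int)))).map
      (fun k => pvFmt k ((List.count k L : Int))) := by
  match L with
  | [] => simp [pvRuns]
  | x :: xs =>
    rw [pvRuns]
    set run := xs.takeWhile (fun y => y == x) with hrun
    set rest := xs.dropWhile (fun y => y == x) with hrest
    have hsplit : run ++ rest = xs := List.takeWhile_append_dropWhile
    have hrunx : ∀ y ∈ run, y = x := by
      intro y hy
      simpa using List.mem_takeWhile_imp hy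
    have hxrest : x ∉ rest :=
      pv_not_mem_dropWhile xs x (fun y hy => (List.pairwise_cons.mp hp).1 y hy) hp.tail
    have hcx : List.count x (x :: xs) = run.length + 1 := by
      rw [List.count_cons_self, ← hsplit, List.count_append]
      rw [List.count_eq_zero.mpr hxrest]
      have : List.count x run = run.length :=
        List.count_eq_length.mpr (fun b hb => (hrunx b hb).symm)
      omega
    have hck : ∀ k, k ≠ x → List.count k (x :: xs) = List.count k rest := by
      intro k hk
      have h0 : List.count k run = 0 :=
        List.count_eq_zero.mpr (fun hmem => hk (hrunx k hmem))
      rw [← hsplit, List.count_cons, List.count_append, h0]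
      simp [Ne.symm hk]
    have hofL : PySem.Set.ofList (x :: xs) = x :: PySem.Set.ofList rest := by
      rw [PySem.Set.ofList_cons]
      show _ :: (PySem.Set.ofList xs).filter _ = _
      rw [pv_ofList_filter, ← hsplit, List.filter_append]
      rw [List.filter_eq_nil_iff.mpr (by intro a ha; simp [hrunx a ha])]
      rw [List.filter_eq_self.mpr (by
        intro a ha
        have : a ≠ x := fun h => hxrest (h ▸ ha)
        simpa using this)]
      simp
    have hrestp : rest.Pairwise (· ≤ ·) := hp.tail.sublist (List.dropWhile_sublist _)
    have ih := pv_runs_eq rest hrestp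
    rw [hofL, List.filter_cons, List.filter_congr (l := PySem.Set.ofList rest)
        (q := fun k => decide ((1 : Int) < (List.count k rest : Int)))
        (by
          intro k hk
          have hkr : k ∈ rest := (PySem.Set.mem_ofList rest k).mp hk
          have hkx : k ≠ x := fun h => hxrest (h ▸ hkr)
          rw [hck k hkx])]
    have hcb : ((1 : Int) < (List.count x (x :: xs) : Int)) ↔ run.length + 1 > 1 := by
      rw [hcx]
      constructor
      · intro h; exact_mod_cast h
      · intro h; exact_mod_cast h
    have hmapc : List.map (fun k => pvFmt k ((List.count k (x :: xs) : Int)))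
        (List.filter (fun k => decide ((1 : Int) < (List.count k rest : Int))) (PySem.Set.ofList rest))
        = List.map (fun k => pvFmt k ((List.count k rest : Int)))
        (List.filter (fun k => decide ((1 : Int) < (List.count k rest : Int))) (PySem.Set.ofList rest)) := by
      apply List.map_congr_left
      intro k hk
      have hkr : k ∈ rest := (PySem.Set.mem_ofList rest k).mp ((List.mem_filter.mp hk).1)
      have hkx : k ≠ x := fun h => hxrest (h ▸ hkr)
      rw [hck k hkx]
    by_cases hcond : run.length + 1 > 1
    · rw [if_pos hcond, if_pos (decide_eq_true (hcb.mpr hcond)), List.map_cons, ih, hmapc]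
      rw [hcx]
      push_cast
      rw [List.singleton_append]
    · rw [if_neg hcond,
        if_neg (by simp only [decide_eq_true_eq]; exact fun h => hcond (hcb.mp h)),
        ih, hmapc, List.nil_append]
termination_by L.length
decreasing_by
  have := List.length_dropWhile_le (fun y => y == x) xs
  simp only [List.length_cons]
  omega

-- ===== VERDICT (by name: the statement is the Claim_ definition above) =====
theorem v4_check_unique_ids_py_spec : Claim_equal_v4_check_unique_ids_py := by
  intro items _
  unfold Spec_v4_check_unique_ids_py v4_check_unique_ids_py v4_check_unique_ids_py_alt
  show (PySem.List.sorted (items.foldl (fun d item =>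
        let iid := pvIid item
        d.insert iid (d.getD iid 0 + 1)) PySem.Dict.empty).items (fun p => p.1) false).foldl
      (fun findings p => if p.2 > 1 then findings ++ [pvFmt p.1 p.2] else findings) []
    = pvRuns (PySem.List.sorted (items.map (fun item => pvIid item)) (fun s => s) false)
  set ids := items.map (fun item => pvIid item) with hids
  set L := PySem.List.sorted ids (fun s => s) false with hL
  have hLperm : L.Perm ids := PySem.List.sorted_perm ids (fun s => s) false
  have hLp : L.Pairwise (· ≤ ·) := PySem.List.sorted_pairwise ids (fun s => s)
  -- the counting loop is Counter(ids)
  have hseen : ∀ (l : List (List (String × String))) (d : PySem.Dict String Int),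
      l.foldl (fun d item =>
        let iid := pvIid item
        d.insert iid (d.getD iid 0 + 1)) d
      = (l.map (fun item => pvIid item)).foldl
          (fun d i => d.insert i (d.getD i 0 + 1)) d := by
    intro l
    induction l with
    | nil => intro d; rfl
    | cons a t iht => intro d; exact iht _
  rw [hseen, PySem.Dict.foldl_insert_getD_add_one_eq_counter,
    PySem.Dict.items_counter, ← hids]
  -- sorted by key = the strictly increasing arrangement built from sorted(ids)
  have hofperm : (PySem.Set.ofList L).Perm (PySem.Set.ofList ids) := by
    rw [List.perm_ext_iff_of_nodup (PySem.Set.nodup_ofList L) (PySem.Set.nodup_ofList ids)]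
    intro a
    rw [PySem.Set.mem_ofList, PySem.Set.mem_ofList, hL, PySem.List.mem_sorted]
  have hcnt : ∀ k, List.count k L = List.count k ids := fun k => hLperm.count_eq k
  have hsorted : PySem.List.sorted
      ((PySem.Set.ofList ids).map (fun k => (k, (List.count k ids : Int))))
      (fun p => p.1) false
      = (PySem.Set.ofList L).map (fun k => (k, (List.count k L : Int))) := by
    apply PySem.List.sorted_eq_of_perm_of_pairwise_lt
    · have : (fun k => ((k, (List.count k L : Int)) : String × Int))
          = fun k => (k, (List.count k ids : Int)) := by
        funext k; rw [hcnt k]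
      rw [this]
      exact hofperm.map _
    · rw [List.pairwise_map]
      have hsub : (PySem.Set.ofList L).Pairwise (· ≤ ·) :=
        hLp.sublist (pv_ofList_sublist L)
      have hne : (PySem.Set.ofList L).Pairwise (· ≠ ·) := PySem.Set.nodup_ofList L
      exact (hsub.and hne).imp (fun h => lt_of_le_of_ne h.1 h.2)
  rw [hsorted, PySem.List.foldl_append_ite (fun p : String × Int => p.2 > 1)
    (fun p : String × Int => pvFmt p.1 p.2)
    ((PySem.Set.ofList L).map (fun k => (k, (List.count k L : Int)))) []]
  rw [List.nil_append, List.filter_map, List.map_map]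
  rw [pv_runs_eq L hLp]
  rfl
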